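-- pv_equiv track=rewrite | github.com/AmadeuszSwider/Algorytmy_optymalizacji | projekt.py | oblicz_funkcje_celu
-- ===== SOURCE A (Python) =====
-- def oblicz_funkcje_celu(permutacja, zadania):
--     czas_zakonczenia_poprzedniego = 0
--     maksymalne_opoznienie = 0
--     for i in permutacja:
--         czas_trwania, termin_wykonania, czas_dostepnosci = zadania[i]
--         czas_start = max(czas_zakonczenia_poprzedniego, czas_dostepnosci)
--         czas_zakonczenia_biezacego = czas_start + czas_trwania
--         opoznienie = max(0, czas_zakonczenia_biezacego - termin_wykonania)
--         maksymalne_opoznienie = max(maksymalne_opoznienie, opoznienie)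
--         czas_zakonczenia_poprzedniego = czas_zakonczenia_biezacego
--     return maksymalne_opoznienie
-- ===== SOURCE B (Python) =====
-- def oblicz_funkcje_celu(permutacja, zadania):
--     # pass 1: build the schedule table of (completion time, due date)
--     tabela = []
--     poprzedni = 0
--     for i in permutacja:
--         czas_trwania, termin_wykonania, czas_dostepnosci = zadania[i]
--         poprzedni = max(poprzedni, czas_dostepnosci) + czas_trwania
--         tabela.append((poprzedni, termin_wykonania))
--     # pass 2: reduce to the maximum lateness, clamped below by the 0 seed
--     wynik = 0
--     for koniec, termin in tabela:
--         wynik = max(wynik, koniec - termin)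
--     return wynik
-- ===== Notes on version B (the rewrite author's own statement) =====
-- stated objective: alternative
-- what changed: B splits A's single fused loop into two passes: first build the completion-time table with the max(prev, availability)+duration recurrence, then a separate reduction taking the max of (completion - due), whose 0 seed provides the clamp that A applies per element.
import Mathlib
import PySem

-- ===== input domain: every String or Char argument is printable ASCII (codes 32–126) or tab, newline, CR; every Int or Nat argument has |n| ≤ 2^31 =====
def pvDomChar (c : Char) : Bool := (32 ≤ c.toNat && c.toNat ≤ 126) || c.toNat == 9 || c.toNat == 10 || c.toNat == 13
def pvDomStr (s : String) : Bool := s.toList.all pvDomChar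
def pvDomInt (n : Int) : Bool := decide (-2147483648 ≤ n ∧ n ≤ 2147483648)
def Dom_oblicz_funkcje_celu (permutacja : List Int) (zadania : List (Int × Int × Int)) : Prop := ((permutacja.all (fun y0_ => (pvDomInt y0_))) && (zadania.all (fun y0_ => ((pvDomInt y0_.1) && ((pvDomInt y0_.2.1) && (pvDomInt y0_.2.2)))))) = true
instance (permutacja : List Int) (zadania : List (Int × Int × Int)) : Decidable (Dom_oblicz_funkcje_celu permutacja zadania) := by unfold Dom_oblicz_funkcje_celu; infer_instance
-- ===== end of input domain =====

-- B replaces A's fused loop by two passes: build the completion-time table, then reduce to the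
-- clamped maximum lateness (objective: alternative decomposition, same cost).

-- ===== PORT A =====
-- A's single loop, state = (czas_zakonczenia_poprzedniego, maksymalne_opoznienie).
-- zadania[i] is PySem.List.pyGet?; Pre_ guarantees it is `some`, `.getD (0,0,0)` is never reached there.
def oblicz_funkcje_celu (permutacja : List Int) (zadania : List (Int × Int × Int)) : Int :=
  (permutacja.foldl (fun (st : Int × Int) i =>
      let z := (PySem.List.pyGet? zadania i).getD (0, 0, 0)
      let czas_start := max st.1 z.2.2
      let czas_zakonczenia_biezacego := czas_start + z.1
      let opoznienie := max 0 (czas_zakonczenia_biezacego - z.2.1)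
      (czas_zakonczenia_biezacego, max st.2 opoznienie)) (0, 0)).2

-- ===== PORT B =====
-- pass 1 of Source B: build the table of (completion time, due date)
def pvTabela (permutacja : List Int) (zadania : List (Int × Int × Int)) : List (Int × Int) :=
  (permutacja.foldl (fun (st : Int × List (Int × Int)) i =>
      let z := (PySem.List.pyGet? zadania i).getD (0, 0, 0)
      let poprzedni := max st.1 z.2.2 + z.1
      (poprzedni, st.2 ++ [(poprzedni, z.2.1)])) (0, [])).2

-- pass 2 of Source B: reduce to the maximum lateness, clamped by the 0 seed
def oblicz_funkcje_celu_alt (permutacja : List Int) (zadania : List (Int × Int × Int)) : Int :=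
  (pvTabela permutacja zadania).foldl (fun wynik kt => max wynik (kt.1 - kt.2)) 0

-- ===== PRECONDITION & SPEC =====
-- Pre_: every index hits zadania (Python wraps negatives); outside it both Pythons raise IndexError.
def Pre_oblicz_funkcje_celu (permutacja : List Int) (zadania : List (Int × Int × Int)) : Prop :=
  ∀ i ∈ permutacja, -(zadania.length : Int) ≤ i ∧ i < (zadania.length : Int)
instance (permutacja : List Int) (zadania : List (Int × Int × Int)) : Decidable (Pre_oblicz_funkcje_celu permutacja zadania) := by unfold Pre_oblicz_funkcje_celu; infer_instance
def pvWitness_oblicz_funkcje_celu : List Int × (List (Int × Int × Int)) := ([1, 0, -1], [(3, 4, 1), (2, 2, 0)])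

def Spec_oblicz_funkcje_celu (permutacja : List Int) (zadania : List (Int × Int × Int)) (out : Int) : Prop := out = oblicz_funkcje_celu_alt permutacja zadania
instance (permutacja : List Int) (zadania : List (Int × Int × Int)) (out : Int) : Decidable (Spec_oblicz_funkcje_celu permutacja zadania out) := by unfold Spec_oblicz_funkcje_celu; infer_instance

-- ===== CLAIM (what is proved, stated in full; the proofs are below) =====
def Claim_equal_oblicz_funkcje_celu : Prop := ∀ (permutacja : List Int) (zadania : List (Int × Int × Int)), Dom_oblicz_funkcje_celu permutacja zadania → Pre_oblicz_funkcje_celu permutacja zadania → Spec_oblicz_funkcje_celu permutacja zadania (oblicz_funkcje_celu permutacja zadania)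

-- ===== LEMMAS AND PROOFS =====

-- abstract schedule table, from an arbitrary previous completion time
def pvTable (zadania : List (Int × Int × Int)) : List Int → Int → List (Int × Int)
  | [], _ => []
  | i :: rest, prev =>
      let z := (PySem.List.pyGet? zadania i).getD (0, 0, 0)
      let fin := max prev z.2.2 + z.1
      (fin, z.2.1) :: pvTable zadania rest fin

theorem pvTabela_fold (zadania : List (Int × Int × Int)) :
    ∀ (perm : List Int) (prev : Int) (acc : List (Int × Int)),
      (perm.foldl (fun (st : Int × List (Int × Int)) i =>
          let z := (PySem.List.pyGet? zadania i).getD (0, 0, 0)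
          let poprzedni := max st.1 z.2.2 + z.1
          (poprzedni, st.2 ++ [(poprzedni, z.2.1)])) (prev, acc)).2
        = acc ++ pvTable zadania perm prev := by
  intro perm
  induction perm with
  | nil => intro prev acc; simp [pvTable]
  | cons i rest ih =>
      intro prev acc
      simp only [List.foldl_cons, pvTable]
      rw [ih]
      simp

theorem pvReduce_table (zadania : List (Int × Int × Int)) :
    ∀ (perm : List Int) (prev m : Int), 0 ≤ m →
      (perm.foldl (fun (st : Int × Int) i =>
          let z := (PySem.List.pyGet? zadania i).getD (0, 0, 0)
          let czas_start := max st.1 z.2.2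
          let czas_zakonczenia_biezacego := czas_start + z.1
          let opoznienie := max 0 (czas_zakonczenia_biezacego - z.2.1)
          (czas_zakonczenia_biezacego, max st.2 opoznienie)) (prev, m)).2
        = (pvTable zadania perm prev).foldl (fun wynik kt => max wynik (kt.1 - kt.2)) m := by
  intro perm
  induction perm with
  | nil => intro prev m _; simp [pvTable]
  | cons i rest ih =>
      intro prev m hm
      simp only [List.foldl_cons, pvTable]
      rw [ih _ _ (by omega)]
      congr 1
      omega

-- ===== VERDICT (by name: the statement is the Claim_ definition above) =====
theorem oblicz_funkcje_celu_spec : Claim_equal_oblicz_funkcje_celu := by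
  intro permutacja zadania _ _
  show oblicz_funkcje_celu permutacja zadania = oblicz_funkcje_celu_alt permutacja zadania
  unfold oblicz_funkcje_celu oblicz_funkcje_celu_alt pvTabela
  rw [pvReduce_table zadania permutacja 0 0 le_rfl, pvTabela_fold zadania permutacja 0 []]
  simp
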